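-- pv_equiv track=rewrite | github.com/MrBrantCode/unitest_baseline | mut_generate/mist_train_cf/cf_19521/solution.py | filter_strings
-- ===== SOURCE A (Python) =====
-- def filter_strings(strings):
--     vowels = ['a', 'e', 'i', 'o', 'u']
--     filtered_strings = []
--
--     for string in strings:
--         if string[0].lower() in vowels and len(string) >= 5:
--             consecutive_vowels = False
--             for i in range(len(string)-1):
--                 if string[i].lower() in vowels and string[i+1].lower() in vowels:
--                     consecutive_vowels = True
--                     break
--             if consecutive_vowels:
--                 filtered_strings.append(string)
--
--     return filtered_strings
-- ===== SOURCE B (Python) =====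
-- VOWELS = 'aeiou'
-- VOWEL_PAIRS = [v + w for v in VOWELS for w in VOWELS]
--
-- def filter_strings(strings):
--     return [s for s in strings
--             if s[0].lower() in VOWELS and len(s) >= 5
--             and any(pair in s.lower() for pair in VOWEL_PAIRS)]
-- ===== Notes on version B (the rewrite author's own statement) =====
-- stated objective: alternative
-- what changed: A's index loop with a break flag testing string[i]/string[i+1] pairs is replaced by precomputing the 25 two-vowel strings once and testing substring membership ('pair in s.lower()') of any of them, so no positional pair scan remains.
import Mathlib
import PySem

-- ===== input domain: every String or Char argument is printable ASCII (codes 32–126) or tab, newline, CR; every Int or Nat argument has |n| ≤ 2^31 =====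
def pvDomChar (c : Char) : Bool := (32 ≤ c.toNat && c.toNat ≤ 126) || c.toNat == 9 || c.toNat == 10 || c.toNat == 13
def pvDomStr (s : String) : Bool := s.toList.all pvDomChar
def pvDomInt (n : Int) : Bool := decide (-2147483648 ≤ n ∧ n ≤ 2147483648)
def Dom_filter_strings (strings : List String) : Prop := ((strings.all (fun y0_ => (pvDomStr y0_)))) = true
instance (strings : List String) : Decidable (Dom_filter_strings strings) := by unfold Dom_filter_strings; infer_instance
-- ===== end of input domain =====

-- B replaces A's positional index loop (break flag, string[i]/string[i+1] pair tests) by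
-- precomputing the 25 two-vowel strings and testing substring membership of any of them
-- in the lowered string (objective: alternative).

-- ===== PORT A =====
def pvVowelsA : List Char := ['a', 'e', 'i', 'o', 'u']

def filter_strings (strings : List String) : List String :=
  strings.foldl (fun filtered s =>
    let cs := s.toList
    if pvVowelsA.contains (PySem.Chars.lowerChar (PySem.List.pyGetD cs 0 ' ')) && decide (5 ≤ cs.length) then
      let consec : Bool := (PySem.List.pyRange 0 ((cs.length : Int) - 1) 1).foldl
        (fun cv i =>
          if cv then cv
          else if pvVowelsA.contains (PySem.Chars.lowerChar (PySem.List.pyGetD cs i ' ')) &&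
                  pvVowelsA.contains (PySem.Chars.lowerChar (PySem.List.pyGetD cs (i + 1) ' ')) then true
          else cv) false
      if consec then filtered ++ [s] else filtered
    else filtered) []

-- ===== PORT B =====
def pvVowelsB : List Char := "aeiou".toList

-- VOWEL_PAIRS = [v + w for v in VOWELS for w in VOWELS]
def pvVowelPairs : List (List Char) :=
  pvVowelsB.flatMap (fun v => pvVowelsB.map (fun w => [v, w]))

def filter_strings_alt (strings : List String) : List String :=
  strings.filter (fun s =>
    PySem.Chars.isIn [PySem.Chars.lowerChar (PySem.List.pyGetD s.toList 0 ' ')] pvVowelsB &&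
    decide (5 ≤ s.toList.length) &&
    pvVowelPairs.any (fun pair => PySem.Chars.isIn pair (PySem.Chars.lower s.toList)))

-- ===== PRECONDITION & SPEC =====
-- Pre_ excludes lists containing an empty string: Python A raises IndexError on string[0] there (B raises too).
def Pre_filter_strings (strings : List String) : Prop := ∀ s ∈ strings, s.toList ≠ []
instance (strings : List String) : Decidable (Pre_filter_strings strings) := by
  unfold Pre_filter_strings; infer_instance

def pvWitness_filter_strings : List String := ["aeiii", "xyz", "ouch!"]

def Spec_filter_strings (strings : List String) (out : List String) : Prop := out = filter_strings_alt strings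
instance (strings : List String) (out : List String) : Decidable (Spec_filter_strings strings out) := by
  unfold Spec_filter_strings; infer_instance

-- ===== CLAIM (what is proved, stated in full; the proofs are below) =====
def Claim_equal_filter_strings : Prop := ∀ (strings : List String), Dom_filter_strings strings → Pre_filter_strings strings → Spec_filter_strings strings (filter_strings strings)

-- ===== LEMMAS AND PROOFS =====

-- B's per-string predicate, named for the proof
def pvPredB (s : String) : Bool :=
  PySem.Chars.isIn [PySem.Chars.lowerChar (PySem.List.pyGetD s.toList 0 ' ')] pvVowelsB &&
  decide (5 ≤ s.toList.length) &&
  pvVowelPairs.any (fun pair => PySem.Chars.isIn pair (PySem.Chars.lower s.toList))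

-- the single-char substring test B makes on s[0].lower() is list membership
lemma pv_isIn_single (c : Char) : PySem.Chars.isIn [c] pvVowelsB = pvVowelsA.contains c := by
  have h : pvVowelsB = pvVowelsA := by decide
  rw [h]
  cases hm : pvVowelsA.contains c with
  | true =>
    exact (PySem.Chars.isIn_iff_infix _ _).mpr ((List.singleton_infix_iff c pvVowelsA).mpr (by simpa using hm))
  | false =>
    by_contra hx
    have := (PySem.Chars.isIn_iff_infix _ _).mp (by simpa using Bool.of_not_eq_false hx)
    have hmem := (List.singleton_infix_iff c pvVowelsA).mp this
    simp [hmem] at hm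

-- A's break-flag fold is an `any`
lemma pv_flag_foldl_any (q : Int → Bool) (l : List Int) :
    l.foldl (fun cv i => if cv then cv else if q i then true else cv) false = l.any q := by
  have h : (fun (cv : Bool) (i : Int) => if cv then cv else if q i then true else cv)
      = (fun (cv : Bool) (i : Int) => if q i then true else cv) := by
    funext cv i; cases cv <;> cases h : q i <;> simp
  rw [h, PySem.List.foldl_if_true_eq]
  simp

-- indexed adjacent-pair scan = any over zip with the tail
lemma pv_adj_any (f : Char → Char → Bool) : ∀ (cs : List Char),
    (List.range (cs.length - 1)).any (fun k => f (cs.getD k ' ') (cs.getD (k + 1) ' ')) =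
    (cs.zip cs.tail).any (fun p => f p.1 p.2) := by
  intro cs
  induction cs with
  | nil => simp
  | cons a t ih =>
    cases t with
    | nil => simp
    | cons b t' =>
      rw [show (a :: b :: t').tail = b :: t' from rfl, List.zip_cons_cons, List.any_cons]
      rw [show (a :: b :: t').length - 1 = ((b :: t').length - 1) + 1 from by simp]
      simp only [List.tail_cons] at ih
      rw [List.range_succ_eq_map, List.any_cons, List.any_map, ← ih]
      congr 1

-- a two-char list is an infix exactly when it is an adjacent pair
lemma pv_pair_infix_iff (a b : Char) : ∀ (l : List Char), [a, b] <:+: l ↔ (a, b) ∈ l.zip l.tail := by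
  intro l
  induction l with
  | nil => simp
  | cons c t ih =>
    cases t with
    | nil => simp [List.infix_cons_iff]
    | cons d t' =>
      simp only [List.tail_cons] at ih ⊢
      rw [List.zip_cons_cons, List.infix_cons_iff, List.mem_cons, ih]
      constructor
      · rintro (hp | h)
        · left
          rcases hp with ⟨u, hu⟩
          simp at hu
          obtain ⟨h1, h2, _⟩ := hu
          simp [h1, h2]
        · right; exact h
      · rintro (h | h)
        · left
          simp only [Prod.mk.injEq] at h
          obtain ⟨rfl, rfl⟩ := h
          exact ⟨t', rfl⟩
        · right; exact h

-- adjacent-vowel-pair scan over the lowered chars = some two-vowel string is a substring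
lemma pv_pairs_eq (low : List Char) :
    (low.zip low.tail).any (fun p => pvVowelsA.contains p.1 && pvVowelsA.contains p.2)
    = pvVowelPairs.any (fun pair => PySem.Chars.isIn pair low) := by
  rw [Bool.eq_iff_iff]
  simp only [List.any_eq_true, Bool.and_eq_true, List.contains_eq_mem, decide_eq_true_eq]
  constructor
  · rintro ⟨⟨a, b⟩, hmem, ha, hb⟩
    refine ⟨[a, b], ?_, (PySem.Chars.isIn_iff_infix _ _).mpr ((pv_pair_infix_iff a b low).mpr hmem)⟩
    simp only [pvVowelPairs, List.mem_flatMap, List.mem_map]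
    exact ⟨a, by simpa [pvVowelsB, pvVowelsA] using ha, b, by simpa [pvVowelsB, pvVowelsA] using hb, rfl⟩
  · rintro ⟨pair, hp, hin⟩
    simp only [pvVowelPairs, List.mem_flatMap, List.mem_map] at hp
    obtain ⟨a, ha, b, hb, rfl⟩ := hp
    refine ⟨(a, b), (pv_pair_infix_iff a b low).mp ((PySem.Chars.isIn_iff_infix _ _).mp hin), ?_, ?_⟩
    · simpa [pvVowelsA, pvVowelsB] using ha
    · simpa [pvVowelsA, pvVowelsB] using hb

-- A's loop body equals 'append if pvPredB'
lemma pv_body_eq (s : String) (acc : List String) :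
    (let cs := s.toList
     if pvVowelsA.contains (PySem.Chars.lowerChar (PySem.List.pyGetD cs 0 ' ')) && decide (5 ≤ cs.length) then
       let consec : Bool := (PySem.List.pyRange 0 ((cs.length : Int) - 1) 1).foldl
         (fun cv i =>
           if cv then cv
           else if pvVowelsA.contains (PySem.Chars.lowerChar (PySem.List.pyGetD cs i ' ')) &&
                   pvVowelsA.contains (PySem.Chars.lowerChar (PySem.List.pyGetD cs (i + 1) ' ')) then true
           else cv) false
       if consec then acc ++ [s] else acc
     else acc) = if pvPredB s then acc ++ [s] else acc := by
  by_cases h1 : (pvVowelsA.contains (PySem.Chars.lowerChar (PySem.List.pyGetD s.toList 0 ' '))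
      && decide (5 ≤ s.toList.length)) = true
  · simp only [h1, if_true]
    have hp1 : ∀ k : Nat, PySem.List.pyGetD s.toList ((k : Int) + 1) ' ' = s.toList.getD (k + 1) ' ' := by
      intro k
      rw [show ((k : Int) + 1) = (((k + 1 : Nat)) : Int) from by push_cast; ring,
        PySem.List.pyGetD_natCast]
    have hconsec :
        (PySem.List.pyRange 0 ((s.toList.length : Int) - 1) 1).foldl
          (fun cv i =>
            if cv then cv
            else if pvVowelsA.contains (PySem.Chars.lowerChar (PySem.List.pyGetD s.toList i ' ')) &&
                    pvVowelsA.contains (PySem.Chars.lowerChar (PySem.List.pyGetD s.toList (i + 1) ' ')) then true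
            else cv) false
        = pvVowelPairs.any (fun pair => PySem.Chars.isIn pair (PySem.Chars.lower s.toList)) := by
      rw [pv_flag_foldl_any]
      rw [show ((s.toList.length : Int) - 1) = ((s.toList.length - 1 : Nat) : Int) from by
          have := (Bool.and_eq_true _ _).mp h1
          have h5 := of_decide_eq_true this.2
          omega,
        PySem.List.pyRange_zero_nat, List.any_map]
      have step1 : ∀ k ∈ List.range (s.toList.length - 1),
          ((fun i => pvVowelsA.contains (PySem.Chars.lowerChar (PySem.List.pyGetD s.toList i ' ')) &&
              pvVowelsA.contains (PySem.Chars.lowerChar (PySem.List.pyGetD s.toList (i + 1) ' '))) ∘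
            (fun k : Nat => (k : Int))) k
          = (fun k : Nat => pvVowelsA.contains (PySem.Chars.lowerChar (s.toList.getD k ' ')) &&
              pvVowelsA.contains (PySem.Chars.lowerChar (s.toList.getD (k + 1) ' '))) k := by
        intro k _
        simp only [Function.comp]
        rw [hp1 k, PySem.List.pyGetD_natCast]
      rw [PySem.List.any_congr_mem step1,
        pv_adj_any (fun x y => pvVowelsA.contains (PySem.Chars.lowerChar x) &&
          pvVowelsA.contains (PySem.Chars.lowerChar y)) s.toList]
      rw [show (s.toList.zip s.toList.tail).any (fun p =>
            pvVowelsA.contains (PySem.Chars.lowerChar p.1) && pvVowelsA.contains (PySem.Chars.lowerChar p.2))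
          = ((PySem.Chars.lower s.toList).zip (PySem.Chars.lower s.toList).tail).any
            (fun p => pvVowelsA.contains p.1 && pvVowelsA.contains p.2) from by
        rw [show PySem.Chars.lower s.toList = s.toList.map PySem.Chars.lowerChar from rfl,
          show (s.toList.map PySem.Chars.lowerChar).tail = s.toList.tail.map PySem.Chars.lowerChar
            from by cases s.toList <;> simp,
          List.zip_map, List.any_map]
        rfl]
      exact pv_pairs_eq (PySem.Chars.lower s.toList)
    rw [hconsec]
    have hpred : pvPredB s = pvVowelPairs.any (fun pair => PySem.Chars.isIn pair (PySem.Chars.lower s.toList)) := by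
      unfold pvPredB
      rw [pv_isIn_single, h1]
      simp
    rw [hpred]
  · have h1f : (pvVowelsA.contains (PySem.Chars.lowerChar (PySem.List.pyGetD s.toList 0 ' '))
        && decide (5 ≤ s.toList.length)) = false := by
      cases hx : (pvVowelsA.contains (PySem.Chars.lowerChar (PySem.List.pyGetD s.toList 0 ' '))
          && decide (5 ≤ s.toList.length)) with
      | false => rfl
      | true => exact absurd hx h1
    have hpred : pvPredB s = false := by
      unfold pvPredB
      rw [pv_isIn_single, h1f]
      simp
    simp only [h1f, hpred]
    simp

-- ===== VERDICT (by name: the statement is the Claim_ definition above) =====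
theorem filter_strings_spec : Claim_equal_filter_strings := by
  intro strings _hdom _hpre
  unfold Spec_filter_strings filter_strings filter_strings_alt
  rw [PySem.List.foldl_congr_mem' strings _
      (fun acc s => if pvPredB s then acc ++ [s] else acc) []
      (fun s _ acc => pv_body_eq s acc)]
  rw [PySem.List.foldl_append_if_eq_filter, List.nil_append]
  rfl
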